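-- pv_equiv track=rewrite | github.com/patrikbrach/infoMailer | venue_enricher/scraper.py | pick_best_email
-- ===== SOURCE A (Python) =====
-- EMAIL_PRIORITY = ["info@", "kontakt@", "bokning@", "reception@"]
--
-- def pick_best_email(emails: list[str]) -> str | None:
--     if not emails:
--         return None
--     for prefix in EMAIL_PRIORITY:
--         for e in emails:
--             if e.lower().startswith(prefix):
--                 return e
--     return sorted(emails)[0]
-- ===== SOURCE B (Python) =====
-- EMAIL_PRIORITY = ["info@", "kontakt@", "bokning@", "reception@"]
--
--
-- def _rank(e):
--     low = e.lower()
--     for i, p in enumerate(EMAIL_PRIORITY):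
--         if low.startswith(p):
--             return i
--     return len(EMAIL_PRIORITY)
--
--
-- def pick_best_email(emails):
--     if not emails:
--         return None
--     best = min(emails, key=_rank)  # stable: first email of lowest rank
--     if _rank(best) == len(EMAIL_PRIORITY):
--         return sorted(emails)[0]
--     return best
-- ===== Notes on version B (the rewrite author's own statement) =====
-- stated objective: alternative
-- what changed: Replaces A's nested prefix-by-prefix rescans of the email list with a single stable min over a per-email priority rank, falling back to sorted(emails)[0] only when no email matches any prefix.
import Mathlib
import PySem

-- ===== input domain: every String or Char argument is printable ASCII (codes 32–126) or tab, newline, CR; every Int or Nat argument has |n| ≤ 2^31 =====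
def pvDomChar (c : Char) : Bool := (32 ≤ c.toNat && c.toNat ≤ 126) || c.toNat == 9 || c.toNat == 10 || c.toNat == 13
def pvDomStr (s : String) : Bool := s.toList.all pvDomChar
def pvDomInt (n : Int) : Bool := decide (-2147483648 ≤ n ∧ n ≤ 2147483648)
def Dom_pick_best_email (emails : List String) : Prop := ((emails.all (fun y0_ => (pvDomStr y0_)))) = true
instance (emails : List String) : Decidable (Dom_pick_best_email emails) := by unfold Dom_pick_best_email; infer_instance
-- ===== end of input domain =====

-- B replaces A's nested prefix-by-prefix rescans with one stable min over a per-email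
-- priority rank (alternative decomposition, same cost).

def EMAIL_PRIORITY : List String := ["info@", "kontakt@", "bokning@", "reception@"]

-- ===== PORT A =====
-- 'for prefix in …: for e in emails: if …: return e' — outer recursion on prefixes,
-- inner first-match scan (find?).
def pickA_loop (emails : List String) : List String → Option String
  | [] => none
  | p :: ps =>
    match emails.find? (fun e => PySem.Str.startswith (PySem.Str.lower e) p) with
    | some e => some e
    | none => pickA_loop emails ps

def pick_best_email (emails : List String) : Option String :=
  if emails = [] then none
  else
    match pickA_loop emails EMAIL_PRIORITY with
    | some e => some e
    | none => PySem.List.pyGet? (PySem.List.sorted emails (fun x => x) false) 0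

-- ===== PORT B =====
-- _rank(e): index of first priority prefix e.lower() starts with, else len(EMAIL_PRIORITY)
def rankB (e : String) : Nat :=
  match EMAIL_PRIORITY.findIdx? (fun p => PySem.Str.startswith (PySem.Str.lower e) p) with
  | some i => i
  | none => EMAIL_PRIORITY.length

def pick_best_email_alt (emails : List String) : Option String :=
  if emails = [] then none
  else
    match PySem.List.min? emails rankB with
    | none => none
    | some best =>
      if rankB best = EMAIL_PRIORITY.length then
        PySem.List.pyGet? (PySem.List.sorted emails (fun x => x) false) 0
      else some best

-- ===== PRECONDITION & SPEC =====
def Spec_pick_best_email (emails : List String) (out : Option String) : Prop := out = pick_best_email_alt emails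
instance (emails : List String) (out : Option String) : Decidable (Spec_pick_best_email emails out) := by unfold Spec_pick_best_email; infer_instance

-- ===== CLAIM (what is proved, stated in full; the proofs are below) =====
def Claim_equal_pick_best_email : Prop := ∀ (emails : List String), Dom_pick_best_email emails → Spec_pick_best_email emails (pick_best_email emails)

-- ===== LEMMAS AND PROOFS =====

-- rank of e w.r.t. an arbitrary prefix list (generalises rankB for the induction)
def rankG (ps : List String) (e : String) : Nat :=
  match ps.findIdx? (fun p => PySem.Str.startswith (PySem.Str.lower e) p) with
  | some i => i
  | none => ps.length

lemma rankB_eq_rankG (e : String) : rankB e = rankG EMAIL_PRIORITY e := rfl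

lemma rankG_le (ps : List String) (e : String) : rankG ps e ≤ ps.length := by
  unfold rankG
  cases h : ps.findIdx? (fun p => PySem.Str.startswith (PySem.Str.lower e) p) with
  | none => exact le_refl _
  | some i =>
    have h2 := List.findIdx?_eq_some_iff_findIdx_eq.mp h
    show i ≤ ps.length
    omega

-- the foldl step of PySem.List.min?
def minStep (key : String → Nat) (acc : Option String) (x : String) : Option String :=
  match acc with
  | none => some x
  | some m => if key x < key m then some x else some m

lemma min?_eq_foldl (key : String → Nat) (xs : List String) :
    PySem.List.min? xs key = xs.foldl (minStep key) none := by
  unfold PySem.List.min?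
  congr 1
  funext acc x
  cases acc <;> rfl

lemma foldl_minStep_zero (key : String → Nat) (t : List String) (a : String)
    (ha : key a = 0) : t.foldl (minStep key) (some a) = some a := by
  induction t with
  | nil => rfl
  | cons y t ih =>
    simp only [List.foldl_cons, minStep, ha]
    have : ¬ key y < 0 := Nat.not_lt_zero _
    simp [this, ih]

lemma foldl_minStep_find_zero (key : String → Nat) (t : List String) (m : String)
    (hf : t.find? (fun x => key x = 0) = some m) :
    ∀ a : String, key a ≠ 0 → t.foldl (minStep key) (some a) = some m := by
  induction t with
  | nil => simp at hf
  | cons y t ih =>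
    intro a ha
    by_cases hy : key y = 0
    · have hm : y = m := by
        rw [List.find?_cons_of_pos (by simpa using hy)] at hf
        exact Option.some.inj hf
      have hlt : key y < key a := by omega
      simp only [List.foldl_cons, minStep, if_pos hlt]
      rw [hm] at hy ⊢
      exact foldl_minStep_zero key t m hy
    · rw [List.find?_cons_of_neg (by simpa using hy)] at hf
      simp only [List.foldl_cons, minStep]
      by_cases hlt : key y < key a
      · rw [if_pos hlt]; exact ih hf y hy
      · rw [if_neg hlt]; exact ih hf a ha

lemma min?_of_find_zero (key : String → Nat) (xs : List String) (m : String)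
    (hf : xs.find? (fun x => key x = 0) = some m) :
    PySem.List.min? xs key = some m := by
  cases xs with
  | nil => simp at hf
  | cons x t =>
    rw [min?_eq_foldl]
    simp only [List.foldl_cons, minStep]
    by_cases hx : key x = 0
    · have hm : x = m := by
        rw [List.find?_cons_of_pos (by simpa using hx)] at hf
        exact Option.some.inj hf
      rw [hm] at hx ⊢
      exact foldl_minStep_zero key t m hx
    · rw [List.find?_cons_of_neg (by simpa using hx)] at hf
      exact foldl_minStep_find_zero key t m hf x hx

lemma foldl_minStep_shift (k1 k2 : String → Nat) (t : List String)
    (h : ∀ x ∈ t, k1 x = k2 x + 1) :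
    ∀ a : String, k1 a = k2 a + 1 →
      t.foldl (minStep k1) (some a) = t.foldl (minStep k2) (some a) := by
  induction t with
  | nil => intro a _; rfl
  | cons y t ih =>
    intro a ha
    have hy : k1 y = k2 y + 1 := h y (by simp)
    have hmem : ∀ x ∈ t, k1 x = k2 x + 1 := fun x hx => h x (by simp [hx])
    have hiff : k1 y < k1 a ↔ k2 y < k2 a := by omega
    simp only [List.foldl_cons, minStep]
    by_cases hlt : k2 y < k2 a
    · rw [if_pos (hiff.mpr hlt), if_pos hlt]; exact ih hmem y hy
    · rw [if_neg (fun hc => hlt (hiff.mp hc)), if_neg hlt]; exact ih hmem a ha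

lemma min?_shift (k1 k2 : String → Nat) (xs : List String)
    (h : ∀ x ∈ xs, k1 x = k2 x + 1) :
    PySem.List.min? xs k1 = PySem.List.min? xs k2 := by
  cases xs with
  | nil => rfl
  | cons x t =>
    rw [min?_eq_foldl, min?_eq_foldl]
    simp only [List.foldl_cons, minStep]
    exact foldl_minStep_shift k1 k2 t (fun y hy => h y (by simp [hy])) x (h x (by simp))

lemma rankG_cons_of_no_match (p : String) (ps : List String) (e : String)
    (hm : PySem.Str.startswith (PySem.Str.lower e) p = false) :
    rankG (p :: ps) e = rankG ps e + 1 := by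
  unfold rankG
  rw [List.findIdx?_cons]
  simp only [hm]
  cases h : ps.findIdx? (fun q => PySem.Str.startswith (PySem.Str.lower e) q) with
  | none => simp [List.length_cons]
  | some i => simp

lemma rankG_cons_zero_iff (p : String) (ps : List String) (e : String) :
    (rankG (p :: ps) e = 0) ↔ PySem.Str.startswith (PySem.Str.lower e) p = true := by
  constructor
  · intro h
    by_contra hc
    have hm : PySem.Str.startswith (PySem.Str.lower e) p = false := by
      cases hb : PySem.Str.startswith (PySem.Str.lower e) p
      · rfl
      · exact absurd hb hc
    rw [rankG_cons_of_no_match p ps e hm] at h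
    omega
  · intro h
    have h' : PySem.Chars.startswith (PySem.Chars.lower e.toList) p.toList = true := by
      simpa using h
    unfold rankG
    rw [List.findIdx?_cons]
    simp [h']

-- the key lemma: A's nested loop equals the min-by-rank formulation
lemma loop_eq_min (emails : List String) (ps : List String) :
    pickA_loop emails ps =
      match PySem.List.min? emails (rankG ps) with
      | none => none
      | some m => if rankG ps m < ps.length then some m else none := by
  induction ps with
  | nil =>
    cases hmin : PySem.List.min? emails (rankG []) with
    | none => rfl
    | some m => simp [pickA_loop]
  | cons p ps ih =>
    unfold pickA_loop
    cases hf : emails.find? (fun e => PySem.Str.startswith (PySem.Str.lower e) p) with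
    | some e0 =>
      have hf' : emails.find? (fun e => rankG (p :: ps) e = 0) = some e0 := by
        have : (fun e => decide (rankG (p :: ps) e = 0))
             = (fun e => PySem.Str.startswith (PySem.Str.lower e) p) := by
          funext e
          by_cases h : PySem.Str.startswith (PySem.Str.lower e) p = true
          · have h2 := (rankG_cons_zero_iff p ps e).mpr h
            have h' : PySem.Chars.startswith (PySem.Chars.lower e.toList) p.toList = true := by
              simpa using h
            simp [h2, h']
          · have hb : PySem.Str.startswith (PySem.Str.lower e) p = false := by
              cases hx : PySem.Str.startswith (PySem.Str.lower e) p
              · rfl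
              · exact absurd hx h
            have hb' : PySem.Chars.startswith (PySem.Chars.lower e.toList) p.toList = false := by
              simpa using hb
            have : ¬ rankG (p :: ps) e = 0 := fun hc =>
              h ((rankG_cons_zero_iff p ps e).mp hc)
            simp [hb', this]
        simpa [this] using hf
      have hmin := min?_of_find_zero (rankG (p :: ps)) emails e0 hf'
      have he0 : rankG (p :: ps) e0 = 0 := by
        have := List.find?_some hf'
        simpa using this
      rw [hmin]
      simp [he0]
    | none =>
      have hnone : ∀ e ∈ emails, PySem.Str.startswith (PySem.Str.lower e) p = false := by
        intro e he
        have := List.find?_eq_none.mp hf e he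
        simpa using this
      have hshift : ∀ e ∈ emails, rankG (p :: ps) e = rankG ps e + 1 := fun e he =>
        rankG_cons_of_no_match p ps e (hnone e he)
      rw [min?_shift _ _ emails hshift, ih]
      cases hmin : PySem.List.min? emails (rankG ps) with
      | none => rfl
      | some m =>
        have hm : m ∈ emails := PySem.List.min?_mem hmin
        have hsm := hshift m hm
        by_cases hlt : rankG ps m < ps.length
        · simp [hlt, hsm, Nat.succ_lt_succ hlt]
        · have h2 : ¬ rankG (p :: ps) m < (p :: ps).length := by
            rw [hsm]; simp only [List.length_cons]; omega
          simp only [if_neg hlt, if_neg h2]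

-- ===== VERDICT (by name: the statement is the Claim_ definition above) =====
theorem pick_best_email_spec : Claim_equal_pick_best_email := by
  intro emails _
  unfold Spec_pick_best_email pick_best_email pick_best_email_alt
  by_cases hnil : emails = []
  · simp [hnil]
  · rw [if_neg hnil, if_neg hnil]
    rw [loop_eq_min emails EMAIL_PRIORITY]
    have hrk : PySem.List.min? emails rankB = PySem.List.min? emails (rankG EMAIL_PRIORITY) := by
      have : rankB = rankG EMAIL_PRIORITY := funext rankB_eq_rankG
      rw [this]
    rw [hrk]
    cases hmin : PySem.List.min? emails (rankG EMAIL_PRIORITY) with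
    | none =>
      exact absurd ((PySem.List.min?_eq_none_iff emails rankB).mp (hrk ▸ hmin)) hnil
    | some m =>
      simp only [rankB_eq_rankG]
      by_cases hlt : rankG EMAIL_PRIORITY m < EMAIL_PRIORITY.length
      · have : ¬ rankG EMAIL_PRIORITY m = EMAIL_PRIORITY.length := by omega
        simp [hlt, this]
      · have heq : rankG EMAIL_PRIORITY m = EMAIL_PRIORITY.length := by
          have := rankG_le EMAIL_PRIORITY m
          omega
        simp [heq]
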